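-- pv_equiv track=rewrite | github.com/CocoRoF/Contextify | contextifier/core/processor/rtf_helper/rtf_table_extractor.py | _find_first_cell_marker
-- ===== SOURCE A (Python) =====
-- def _find_first_cell_marker(row_text: str) -> int:
--     """Find first \\cell marker (not \\cellx).
--
--     Args:
--         row_text: Row text
--
--     Returns:
--         Position of first \\cell marker
--     """
--     pos = 0
--     while True:
--         idx = row_text.find('\\cell', pos)
--         if idx == -1:
--             return len(row_text)
--         if idx + 5 < len(row_text) and row_text[idx + 5] == 'x':
--             pos = idx + 1
--             continue
--         return idx
-- ===== SOURCE B (Python) =====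
-- def _find_first_cell_marker(row_text: str) -> int:
--     """Find first \\cell marker (not \\cellx): single left-to-right index scan."""
--     n = len(row_text)
--     for i in range(n):
--         if row_text[i:i + 5] == '\\cell' and row_text[i + 5:i + 6] != 'x':
--             return i
--     return n
-- ===== Notes on version B (the rewrite author's own statement) =====
-- stated objective: simpler
-- what changed: Replaces the while-loop of repeated str.find calls with pos-advancing skip logic by a single for-loop over all indices that tests the 5-char slice and the following character directly.
import Mathlib
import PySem

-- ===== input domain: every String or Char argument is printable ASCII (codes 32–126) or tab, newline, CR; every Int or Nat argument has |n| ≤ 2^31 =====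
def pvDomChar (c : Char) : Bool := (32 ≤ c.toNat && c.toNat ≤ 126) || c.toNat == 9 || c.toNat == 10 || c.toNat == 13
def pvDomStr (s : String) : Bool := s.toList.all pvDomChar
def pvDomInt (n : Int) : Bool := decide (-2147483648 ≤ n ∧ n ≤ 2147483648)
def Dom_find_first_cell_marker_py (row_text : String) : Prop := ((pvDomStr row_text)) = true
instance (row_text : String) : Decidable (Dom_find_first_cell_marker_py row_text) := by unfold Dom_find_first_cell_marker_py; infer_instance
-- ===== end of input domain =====

-- B replaces A's while-loop of repeated str.find calls (with pos-advancing skip logic) by a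
-- single for-loop over all indices testing the 5-char slice directly; objective: simpler.

-- the pattern '\cell' as a list of characters
def pvCell : List Char := ['\\', 'c', 'e', 'l', 'l']

-- ===== PORT A =====
-- A's while-True loop, step for step; 'fuel' (length + 1 - pos at every call) is only a
-- structural totality guard — the fuel-0 branch is unreachable (proved in the lemmas below).
def pvAGo (s : List Char) : Nat → Nat → Int
  | 0, _ => (s.length : Int)
  | fuel + 1, pos =>
    let idx := PySem.Chars.findFrom s pvCell (pos : Int)
    if idx = -1 then (s.length : Int)
    else if idx + 5 < (s.length : Int) ∧ PySem.List.pyGet? s (idx + 5) = some 'x' then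
      pvAGo s fuel (idx.toNat + 1)
    else idx

def find_first_cell_marker_py (row_text : String) : Int :=
  pvAGo row_text.toList (row_text.toList.length + 1) 0

-- ===== PORT B =====
-- B's for-loop over i in range(n); slices row_text[i:i+5] / row_text[i+5:i+6] via PySem.List.slice.
-- 'fuel' (length - i at every call) is only a structural totality guard.
def pvBGo (s : List Char) : Nat → Nat → Int
  | 0, _ => (s.length : Int)
  | fuel + 1, i =>
    if i < s.length then
      if PySem.List.slice s (some (i : Int)) (some ((i : Int) + 5)) = pvCell ∧
         PySem.List.slice s (some ((i : Int) + 5)) (some ((i : Int) + 6)) ≠ ['x'] then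
        (i : Int)
      else pvBGo s fuel (i + 1)
    else (s.length : Int)

def find_first_cell_marker_py_alt (row_text : String) : Int :=
  pvBGo row_text.toList row_text.toList.length 0

-- ===== PRECONDITION & SPEC =====
def Spec_find_first_cell_marker_py (row_text : String) (out : Int) : Prop := out = find_first_cell_marker_py_alt row_text
instance (row_text : String) (out : Int) : Decidable (Spec_find_first_cell_marker_py row_text out) := by unfold Spec_find_first_cell_marker_py; infer_instance

-- ===== CLAIM (what is proved, stated in full; the proofs are below) =====
def Claim_equal_find_first_cell_marker_py : Prop := ∀ (row_text : String), Dom_find_first_cell_marker_py row_text → Spec_find_first_cell_marker_py row_text (find_first_cell_marker_py row_text)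

-- ===== LEMMAS AND PROOFS =====

-- B's loop condition at index i, written with the slice arguments in cast form
abbrev pvMarker (s : List Char) (i : Nat) : Prop :=
  PySem.List.slice s (some (i : Int)) (some ((i : Int) + 5)) = pvCell ∧
  PySem.List.slice s (some ((i : Int) + 5)) (some ((i : Int) + 6)) ≠ ['x']

theorem pvBGo_stop (s : List Char) (fuel i : Nat) (h : ¬ i < s.length) :
    pvBGo s fuel i = (s.length : Int) := by
  cases fuel with
  | zero => rfl
  | succ fuel => rw [pvBGo]; simp [h]

-- the computed value does not depend on the fuel, as long as the fuel is sufficient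
theorem pvBGo_fuel (s : List Char) : ∀ fuel fuel' i, s.length ≤ fuel + i → s.length ≤ fuel' + i →
    pvBGo s fuel i = pvBGo s fuel' i := by
  intro fuel
  induction fuel with
  | zero =>
    intro fuel' i hf _
    rw [pvBGo_stop s 0 i (by omega), pvBGo_stop s fuel' i (by omega)]
  | succ fuel ih =>
    intro fuel' i hf hf'
    by_cases h : i < s.length
    · cases fuel' with
      | zero => omega
      | succ fuel' =>
        rw [pvBGo, pvBGo]
        simp only [h, if_true]
        by_cases hm : pvMarker s i
        · rw [if_pos hm, if_pos hm]
        · rw [if_neg hm, if_neg hm]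
          exact ih fuel' (i + 1) (by omega) (by omega)
    · rw [pvBGo_stop s _ i h, pvBGo_stop s fuel' i h]

-- one step of B's loop when the condition fails at i
theorem pvBGo_step_neg (s : List Char) (fuel fuel' i : Nat) (hi : i < s.length)
    (hm : ¬ pvMarker s i) (hf : s.length ≤ fuel + i) (hf' : s.length ≤ fuel' + (i + 1)) :
    pvBGo s fuel i = pvBGo s fuel' (i + 1) := by
  cases fuel with
  | zero => omega
  | succ fuel =>
    rw [pvBGo]
    simp only [hi, if_true]
    rw [if_neg hm]
    exact pvBGo_fuel s fuel fuel' (i + 1) (by omega) hf'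

-- one step of B's loop when the condition holds at i
theorem pvBGo_step_pos (s : List Char) (fuel i : Nat) (hi : i < s.length)
    (hm : pvMarker s i) (hf : s.length ≤ fuel + i) : pvBGo s fuel i = (i : Int) := by
  cases fuel with
  | zero => omega
  | succ fuel =>
    rw [pvBGo]
    simp only [hi, if_true]
    rw [if_pos hm]

-- the first slice equals the pattern iff '\cell' is a prefix of s.drop i
theorem pvMarker_fst_iff (s : List Char) (i : Nat) :
    PySem.List.slice s (some (i : Int)) (some ((i : Int) + 5)) = pvCell ↔ pvCell <+: s.drop i := by
  have h5 : ((i : Int) + 5) = ((i + 5 : Nat) : Int) := by push_cast; ring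
  have hc : pvCell.length = 5 := rfl
  have h55 : i + 5 - i = 5 := by omega
  rw [h5, PySem.List.slice_natCast, List.prefix_iff_eq_take, hc, h55]
  exact eq_comm

-- the second slice is ≠ ['x'] iff NOT (i+5 in range and s[i+5] = 'x')  — A's guard
theorem pvMarker_snd_iff (s : List Char) (i : Nat) :
    PySem.List.slice s (some ((i : Int) + 5)) (some ((i : Int) + 6)) ≠ ['x'] ↔
      ¬ (i + 5 < s.length ∧ s[i + 5]?.any (· = 'x')) := by
  have h5 : ((i : Int) + 5) = ((i + 5 : Nat) : Int) := by push_cast; ring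
  have h6 : ((i : Int) + 6) = ((i + 6 : Nat) : Int) := by push_cast; ring
  rw [h5, h6, PySem.List.slice_natCast]
  have hd : i + 6 - (i + 5) = 1 := by omega
  rw [hd]
  by_cases hlt : i + 5 < s.length
  · rw [List.drop_eq_getElem_cons hlt, List.take_succ_cons, List.take_zero]
    simp [hlt]
  · have : s.drop (i + 5) = [] := List.drop_eq_nil_of_le (by omega)
    simp [this, hlt]

-- if the pattern is not an infix of s.drop k, no index ≥ k satisfies B's condition
theorem pvNoMarker_of_not_infix (s : List Char) (k i : Nat) (hk : k ≤ i)
    (h : ¬ pvCell <:+: s.drop k) : ¬ pvMarker s i := by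
  intro hm
  apply h
  have hp : pvCell <+: s.drop i := (pvMarker_fst_iff s i).mp hm.1
  have : s.drop i = (s.drop k).drop (i - k) := by rw [List.drop_drop]; congr 1; omega
  rw [this] at hp
  exact hp.isInfix.trans (List.drop_suffix _ _).isInfix

-- skip a gap of indices on which B's condition fails
theorem pvBGo_skip (s : List Char) (k : Nat) :
    ∀ j fj, k ≤ j → s.length ≤ fj + j → (∀ i, k ≤ i → i < j → ¬ pvMarker s i) →
    ∀ fk, s.length ≤ fk + k → pvBGo s fk k = pvBGo s fj j := by
  intro j
  induction j with
  | zero =>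
    intro fj hkj hfj _ fk hfk
    cases Nat.le_zero.mp hkj
    exact pvBGo_fuel s fk fj 0 hfk hfj
  | succ j ih =>
    intro fj hkj hfj hnone fk hfk
    rcases Nat.lt_or_ge k (j + 1) with hlt | hge
    · have hkj' : k ≤ j := by omega
      rw [ih (fj + 1) hkj' (by omega) (fun i hi hij => hnone i hi (by omega)) fk hfk]
      by_cases hj : j < s.length
      · exact pvBGo_step_neg s (fj + 1) fj j hj (hnone j hkj' (by omega)) (by omega) (by omega)
      · rw [pvBGo_stop s (fj + 1) j hj, pvBGo_stop s fj (j + 1) (by omega)]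
    · have hk1 : k = j + 1 := by omega
      subst hk1
      exact pvBGo_fuel s fk fj (j + 1) (by omega) (by omega)

-- core equivalence of the two loops (the fuel hypotheses say exactly 'fuel suffices')
theorem pvAGo_eq_pvBGo (s : List Char) :
    ∀ fuel pos, pos ≤ s.length → s.length + 1 ≤ fuel + pos →
    pvAGo s fuel pos = pvBGo s (s.length - pos) pos := by
  intro fuel
  induction fuel with
  | zero => intro pos hpos hf; omega
  | succ fuel ih =>
    intro pos hpos hf
    rw [pvAGo]
    by_cases h1 : PySem.Chars.findFrom s pvCell (pos : Int) = -1
    · -- no occurrence at all beyond pos: B scans to the end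
      simp only [h1, if_true]
      have hni := (PySem.Chars.findFrom_natCast_eq_neg_one_iff s pvCell pos hpos).mp h1
      rw [pvBGo_skip s pos s.length 0 hpos (by omega)
        (fun i hi _ => pvNoMarker_of_not_infix s pos i hi hni) (s.length - pos) (by omega)]
      exact (pvBGo_stop s 0 s.length (by omega)).symm
    · obtain ⟨hle, hpre, hmin⟩ := PySem.Chars.findFrom_natCast_spec s pvCell pos hpos h1
      set idx := PySem.Chars.findFrom s pvCell (pos : Int) with hidx
      have hidx0 : 0 ≤ idx := le_trans (Int.natCast_nonneg pos) hle
      have hcast : ((idx.toNat : Int)) = idx := Int.toNat_of_nonneg hidx0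
      have hlen : idx.toNat + 5 ≤ s.length := by
        have := hpre.length_le
        simp [pvCell] at this
        omega
      have hget : PySem.List.pyGet? s (idx + 5) = s[idx.toNat + 5]? := by
        rw [← hcast]
        have : (idx.toNat : Int) + 5 = ((idx.toNat + 5 : Nat) : Int) := by push_cast; ring
        rw [this, PySem.List.pyGet?_natCast]; simp only [Int.toNat_natCast]
      -- B skips every index in [pos, idx.toNat): the pattern is not even a prefix there
      have hskip : pvBGo s (s.length - pos) pos = pvBGo s (s.length - idx.toNat) idx.toNat := by
        apply pvBGo_skip s pos idx.toNat (s.length - idx.toNat) (by omega) (by omega)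
          (fun i hi hij hm => hmin i hi hij ((pvMarker_fst_iff s i).mp hm.1))
          (s.length - pos) (by omega)
      rw [if_neg h1]
      by_cases h2 : idx + 5 < (s.length : Int) ∧ PySem.List.pyGet? s (idx + 5) = some 'x'
      · -- '\cellx' at idx: both loops move past it
        have hlt : idx.toNat + 5 < s.length := by omega
        have hm : ¬ pvMarker s idx.toNat := by
          intro hm
          apply (pvMarker_snd_iff s idx.toNat).mp hm.2
          refine ⟨hlt, ?_⟩
          rw [hget] at h2
          simp [h2.2]
        rw [if_pos h2, ih (idx.toNat + 1) (by omega) (by omega), hskip]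
        exact (pvBGo_step_neg s (s.length - idx.toNat) (s.length - (idx.toNat + 1)) idx.toNat
          (by omega) hm (by omega) (by omega)).symm
      · -- genuine '\cell' at idx: both return idx
        have hm : pvMarker s idx.toNat := by
          refine ⟨(pvMarker_fst_iff s idx.toNat).mpr hpre, (pvMarker_snd_iff s idx.toNat).mpr ?_⟩
          intro ⟨ha, hb⟩
          apply h2
          refine ⟨by omega, ?_⟩
          rw [hget]
          rw [List.getElem?_eq_getElem ha] at hb ⊢
          simpa using hb
        rw [if_neg h2, hskip,
          pvBGo_step_pos s (s.length - idx.toNat) idx.toNat (by omega) hm (by omega), hcast]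

-- ===== VERDICT (by name: the statement is the Claim_ definition above) =====
theorem find_first_cell_marker_py_spec : Claim_equal_find_first_cell_marker_py := by
  intro row_text _
  unfold Spec_find_first_cell_marker_py find_first_cell_marker_py find_first_cell_marker_py_alt
  rw [pvAGo_eq_pvBGo row_text.toList (row_text.toList.length + 1) 0 (Nat.zero_le _) (by omega)]
  simp
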